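-- pv_equiv track=rewrite | github.com/logan0116/Data_mining-Cluster_analysis-bert- | 2.1data_preprocessing.py | get_special_char
-- ===== SOURCE A (Python) =====
-- def get_special_char(sentence):
--     special_char_list = [',', '.', ';', None]
--     max_bit = -1
--     max_value = -1
--     for i in range(len(special_char_list[:-1])):
--         value_now = sentence.count(special_char_list[i])
--         if value_now > max_value:
--             max_value = value_now
--             max_bit = i
--     return special_char_list[max_bit]
-- ===== SOURCE B (Python) =====
-- def get_special_char(sentence):
--     counts = {',': 0, '.': 0, ';': 0}
--     for ch in sentence:
--         if ch in counts:
--             counts[ch] += 1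
--     return max(counts, key=counts.get)
-- ===== Notes on version B (the rewrite author's own statement) =====
-- stated objective: idiomatic
-- what changed: Replaces three separate .count scans plus a manual index/sentinel argmax over a list ending in None with a single pass building a frequency dict followed by max(counts, key=counts.get), which returns the first maximal key in insertion order exactly as A's strictly-greater selection loop does.
import Mathlib
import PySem

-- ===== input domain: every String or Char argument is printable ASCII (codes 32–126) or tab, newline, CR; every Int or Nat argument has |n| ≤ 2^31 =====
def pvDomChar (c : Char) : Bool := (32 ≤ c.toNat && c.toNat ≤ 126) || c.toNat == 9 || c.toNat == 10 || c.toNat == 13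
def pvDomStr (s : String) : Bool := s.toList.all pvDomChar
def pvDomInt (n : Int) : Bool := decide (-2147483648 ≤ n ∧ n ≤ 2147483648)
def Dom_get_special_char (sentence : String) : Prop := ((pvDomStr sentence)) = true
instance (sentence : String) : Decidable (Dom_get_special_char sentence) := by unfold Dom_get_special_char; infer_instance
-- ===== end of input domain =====

-- B replaces A's three .count scans + manual sentinel argmax by one counting pass and max(counts, key=counts.get) (idiomatic; same behaviour).

-- ===== PORT A =====
def get_special_char (sentence : String) : Option String :=
  let special_char_list : List (Option String) := [some ",", some ".", some ";", none]
  let st : Int × Int :=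
    (PySem.List.pyRange 0 ((PySem.List.slice special_char_list none (some (-1))).length : Int) 1).foldl
      (fun (st : Int × Int) i =>
        -- value_now = sentence.count(special_char_list[i]); index always in range, element never None here
        let value_now : Int :=
          match PySem.List.pyGet? special_char_list i with
          | some (some s) => (PySem.Str.count sentence s : Int)
          | _ => 0
        if value_now > st.2 then (i, value_now) else st)
      ((-1 : Int), (-1 : Int))
  -- return special_char_list[max_bit]; max_bit ∈ {-1,0,1,2} so Python's (possibly negative) index is always in range
  (PySem.List.pyGet? special_char_list st.1).bind id

-- ===== PORT B =====
def get_special_char_alt (sentence : String) : Option String :=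
  let counts : PySem.Dict String Int :=
    sentence.toList.foldl
      (fun d ch =>
        let s := String.singleton ch
        if d.contains s then d.modify s 0 (· + 1) else d)
      (PySem.Dict.ofList [(",", 0), (".", 0), (";", 0)])
  PySem.List.max? counts.keys (fun k => counts.getD k 0)

-- ===== PRECONDITION & SPEC =====
def Spec_get_special_char (sentence : String) (out : Option String) : Prop := out = get_special_char_alt sentence
instance (sentence : String) (out : Option String) : Decidable (Spec_get_special_char sentence out) := by unfold Spec_get_special_char; infer_instance

-- ===== CLAIM (what is proved, stated in full; the proofs are below) =====
def Claim_equal_get_special_char : Prop := ∀ (sentence : String), Dom_get_special_char sentence → Spec_get_special_char sentence (get_special_char sentence)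

-- ===== LEMMAS AND PROOFS =====

-- the common selection tree both programs compute
def pvSel (c0 c1 c2 : Int) : Option String :=
  if c0 < c1 then (if c1 < c2 then some ";" else some ".") else (if c0 < c2 then some ";" else some ",")

lemma count_go_eq (c : Char) (cs : List Char) : ∀ (fuel acc : Nat), cs.length ≤ fuel →
    PySem.Chars.count.go [c] fuel cs acc = acc + cs.count c := by
  induction cs with
  | nil => intro fuel acc _; cases fuel <;> simp [PySem.Chars.count.go]
  | cons h t ih =>
    intro fuel acc hle
    cases fuel with
    | zero => simp at hle
    | succ f =>
      by_cases hc : c = h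
      · subst hc
        simp only [PySem.Chars.count.go, List.isPrefixOf, BEq.rfl, Bool.true_and, if_true]
        have hd : List.drop [c].length (c :: t) = t := by simp
        rw [hd, ih f (acc + 1) (by simpa using hle)]
        simp only [List.count_cons, BEq.rfl, if_true]
        omega
      · have hb : (c == h) = false := by simp [hc]
        simp only [PySem.Chars.count.go, List.isPrefixOf, hb, Bool.false_and]
        rw [ih f acc (by simpa using hle)]
        have hb2 : (h == c) = false := by
          simp only [beq_eq_false_iff_ne, ne_eq]
          exact fun h' => hc h'.symm
        simp [List.count_cons, hb2]

lemma count_singleton (cs : List Char) (c : Char) :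
    PySem.Chars.count cs [c] = cs.count c := by
  simp [PySem.Chars.count, count_go_eq c cs cs.length 0 le_rfl]

lemma str_count_singleton (s : String) (c : Char) :
    PySem.Str.count s (String.singleton c) = s.toList.count c := by
  have : (String.singleton c).toList = [c] := by simp
  simp [PySem.Str.count, this, count_singleton]

lemma A_char (s : String) :
    get_special_char s =
      pvSel (s.toList.count ',' : Int) (s.toList.count '.' : Int) (s.toList.count ';' : Int) := by
  have hr : PySem.List.pyRange 0
      ((PySem.List.slice ([some ",", some ".", some ";", none] : List (Option String)) none (some (-1))).length : Int) 1
      = [0, 1, 2] := by decide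
  have hc0 : PySem.Str.count s "," = s.toList.count ',' := str_count_singleton s ','
  have hc1 : PySem.Str.count s "." = s.toList.count '.' := str_count_singleton s '.'
  have hc2 : PySem.Str.count s ";" = s.toList.count ';' := str_count_singleton s ';'
  simp only [get_special_char, hr, List.foldl]
  have g0 : PySem.List.pyGet? ([some ",", some ".", some ";", none] : List (Option String)) 0 = some (some ",") := by decide
  have g1 : PySem.List.pyGet? ([some ",", some ".", some ";", none] : List (Option String)) 1 = some (some ".") := by decide
  have g2 : PySem.List.pyGet? ([some ",", some ".", some ";", none] : List (Option String)) 2 = some (some ";") := by decide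
  rw [g0, g1, g2]
  simp only [hc0, hc1, hc2]
  have h0 : ((s.toList.count ',' : Int) > (-1 : Int)) := by omega
  rw [if_pos h0]
  by_cases h1 : ((s.toList.count ',' : Int) < (s.toList.count '.' : Int))
  · by_cases h2 : ((s.toList.count '.' : Int) < (s.toList.count ';' : Int))
    · simp [pvSel, h1, h2, gt_iff_lt]
    · simp [pvSel, h1, h2, gt_iff_lt]
  · by_cases h2 : ((s.toList.count ',' : Int) < (s.toList.count ';' : Int))
    · simp [pvSel, h1, h2, gt_iff_lt]
    · simp [pvSel, h1, h2, gt_iff_lt]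

-- the step of B's counting loop
def pvStep (d : PySem.Dict String Int) (ch : Char) : PySem.Dict String Int :=
  let s := String.singleton ch
  if d.contains s then d.modify s 0 (· + 1) else d

lemma keys_fold (l : List Char) : ∀ (d : PySem.Dict String Int),
    (l.foldl pvStep d).keys = d.keys := by
  induction l with
  | nil => intro d; rfl
  | cons h t ih =>
    intro d
    simp only [List.foldl]
    rw [ih]
    unfold pvStep
    by_cases hc : d.contains (String.singleton h)
    · simp [hc, PySem.Dict.keys_modify, PySem.Dict.keys_insert_of_contains]
    · simp [hc]

lemma getD_fold (l : List Char) (k : String) : ∀ (d : PySem.Dict String Int),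
    d.contains k = true →
    (l.foldl pvStep d).getD k 0 = d.getD k 0 + (l.countP (fun ch => String.singleton ch == k) : Int) := by
  induction l with
  | nil => intro d _; simp
  | cons h t ih =>
    intro d hk
    simp only [List.foldl]
    by_cases hc : d.contains (String.singleton h) = true
    · have hstep : pvStep d h = d.modify (String.singleton h) 0 (· + 1) := by
        unfold pvStep; simp [hc]
      rw [hstep, ih _ (by rw [PySem.Dict.contains_modify]; simp [hk])]
      rw [PySem.Dict.getD_modify]
      by_cases he : k = String.singleton h
      · subst he
        simp
        omega
      · rw [if_neg he]
        have : (String.singleton h == k) = false := by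
          simp [BEq.beq]
          exact fun h' => he h'.symm
        simp [this]
    · have hstep : pvStep d h = d := by unfold pvStep; simp at hc; simp [hc]
      rw [hstep, ih _ hk]
      have hne : (String.singleton h == k) = false := by
        by_contra hx
        have hxt : (String.singleton h == k) = true := by
          cases hb : (String.singleton h == k) <;> simp [hb] at hx ⊢
        have heq : String.singleton h = k := eq_of_beq hxt
        rw [heq] at hc
        exact hc hk
      simp [hne]

lemma countP_singleton_eq_count (l : List Char) (c : Char) :
    l.countP (fun ch => String.singleton ch == String.singleton c) = l.count c := by
  unfold List.count
  apply List.countP_congr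
  intro a _
  constructor
  · intro h
    have : String.singleton a = String.singleton c := eq_of_beq h
    have : a = c := by
      have h2 := congrArg String.toList this
      simpa using h2
    simp [this]
  · intro h
    have : a = c := eq_of_beq h
    simp [this]

lemma B_char (s : String) :
    get_special_char_alt s =
      pvSel (s.toList.count ',' : Int) (s.toList.count '.' : Int) (s.toList.count ';' : Int) := by
  have hstep : (fun (d : PySem.Dict String Int) (ch : Char) =>
      let s := String.singleton ch
      if d.contains s then d.modify s 0 (· + 1) else d) = pvStep := by
    funext d ch; rfl
  simp only [get_special_char_alt, hstep]
  set D := s.toList.foldl pvStep (PySem.Dict.ofList [((",":String), (0:Int)), (".", 0), (";", 0)]) with hD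
  have hkeys : D.keys = [",", ".", ";"] := by rw [hD, keys_fold]; decide
  have e0 : ("," : String) = String.singleton ',' := by decide
  have e1 : ("." : String) = String.singleton '.' := by decide
  have e2 : (";" : String) = String.singleton ';' := by decide
  have h0 : D.getD "," 0 = (s.toList.count ',' : Int) := by
    rw [hD, getD_fold s.toList "," _ (by decide)]
    rw [show (PySem.Dict.ofList [((",":String), (0:Int)), (".", 0), (";", 0)]).getD "," 0 = 0 from by decide]
    rw [e0, countP_singleton_eq_count]
    simp
  have h1 : D.getD "." 0 = (s.toList.count '.' : Int) := by
    rw [hD, getD_fold s.toList "." _ (by decide)]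
    rw [show (PySem.Dict.ofList [((",":String), (0:Int)), (".", 0), (";", 0)]).getD "." 0 = 0 from by decide]
    rw [e1, countP_singleton_eq_count]
    simp
  have h2 : D.getD ";" 0 = (s.toList.count ';' : Int) := by
    rw [hD, getD_fold s.toList ";" _ (by decide)]
    rw [show (PySem.Dict.ofList [((",":String), (0:Int)), (".", 0), (";", 0)]).getD ";" 0 = 0 from by decide]
    rw [e2, countP_singleton_eq_count]
    simp
  rw [hkeys]
  simp only [PySem.List.max?, List.foldl, h0, h1, h2]
  unfold pvSel
  by_cases g1 : ((s.toList.count ',' : Int) < (s.toList.count '.' : Int))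
  · by_cases g2 : ((s.toList.count '.' : Int) < (s.toList.count ';' : Int))
    · simp [g1, g2, h1]
    · simp [g1, g2, h1]
  · by_cases g2 : ((s.toList.count ',' : Int) < (s.toList.count ';' : Int))
    · simp [g1, g2, h0]
    · simp [g1, g2, h0]

-- ===== VERDICT (by name: the statement is the Claim_ definition above) =====
theorem get_special_char_spec : Claim_equal_get_special_char := by
  intro s _
  unfold Spec_get_special_char
  rw [A_char s, B_char s]
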